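-- pv_equiv track=rewrite | github.com/eerimoq/asn1tools | asn1tools/codecs/per.py | integer_as_number_of_bits_power_of_two
-- ===== SOURCE A (Python) =====
-- def integer_as_number_of_bits(size):
--     """Returns the minimum number of bits needed to fit given positive
--     integer.
--
--     """
--
--     if size == 0:
--         return 0
--     else:
--         return size.bit_length()
--
-- def integer_as_number_of_bits_power_of_two(size):
--     """Returns the minimum power of two number of bits needed to fit given
--     positive integer.
--
--     """
--
--     if size == 0:
--         return 0
--     else:
--         bit_length = integer_as_number_of_bits(size)
--         bit_length_pow_2 = 1
--
--         while bit_length > bit_length_pow_2: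
--             bit_length_pow_2 <<= 1
--
--         return bit_length_pow_2
-- ===== SOURCE B (Python) =====
-- def integer_as_number_of_bits_power_of_two(size):
--     """Returns the minimum power of two number of bits needed to fit given
--     positive integer.
--
--     """
--
--     if size == 0:
--         return 0
--     n = size.bit_length()
--     return 1 << (n - 1).bit_length()
-- ===== Notes on version B (the rewrite author's own statement) =====
-- stated objective: simpler
-- what changed: Replaced the doubling while-loop that searches the smallest power of two at least bit_length with a closed-form expression: shift one left by the bit length of n minus one.
import Mathlib
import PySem

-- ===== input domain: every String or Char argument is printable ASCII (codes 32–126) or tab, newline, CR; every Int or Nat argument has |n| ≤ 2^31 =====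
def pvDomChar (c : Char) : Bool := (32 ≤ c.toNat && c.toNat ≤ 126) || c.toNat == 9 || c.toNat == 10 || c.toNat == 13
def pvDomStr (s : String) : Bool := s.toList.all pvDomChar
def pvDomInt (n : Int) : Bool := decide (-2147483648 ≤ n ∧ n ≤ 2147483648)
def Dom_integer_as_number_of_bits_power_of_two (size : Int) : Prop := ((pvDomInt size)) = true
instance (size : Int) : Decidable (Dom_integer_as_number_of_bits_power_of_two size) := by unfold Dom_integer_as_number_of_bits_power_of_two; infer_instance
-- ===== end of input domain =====

-- B replaces A's doubling while-loop by the closed form 1 << (n - 1).bit_length(); objective: simpler.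

-- Python's int.bit_length() ported by hand (no PySem primitive): number of bits of |n|,
-- halving recursion with a structural fuel of 64, exact for every |n| < 2^64 (all of Dom).
def pyBitLengthAux : Nat → Nat → Nat
  | 0, _ => 0
  | f + 1, n => if n = 0 then 0 else pyBitLengthAux f (n / 2) + 1

def pyBitLength (n : Nat) : Nat := pyBitLengthAux 64 n

-- ===== PORT A =====
def integer_as_number_of_bits (size : Int) : Int :=
  if size = 0 then 0 else (pyBitLength size.natAbs : Int)

-- A's 'while bit_length > bit_length_pow_2: bit_length_pow_2 <<= 1' loop; the fuel only
-- guards totality (pow_2 doubles from 1, so bl.natAbs steps always suffice).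
def pow2Loop : Nat → Int → Int → Int
  | 0, _, pw => pw
  | f + 1, bl, pw => if bl > pw then pow2Loop f bl (2 * pw) else pw

def integer_as_number_of_bits_power_of_two (size : Int) : Int :=
  if size = 0 then 0
  else
    let bit_length := integer_as_number_of_bits size
    pow2Loop bit_length.natAbs bit_length 1

-- ===== PORT B =====
def integer_as_number_of_bits_power_of_two_alt (size : Int) : Int :=
  if size = 0 then 0
  else
    let n := pyBitLength size.natAbs
    ((1 <<< pyBitLength (n - 1) : Nat) : Int)

-- ===== PRECONDITION & SPEC =====
def Spec_integer_as_number_of_bits_power_of_two (size : Int) (out : Int) : Prop := out = integer_as_number_of_bits_power_of_two_alt size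
instance (size : Int) (out : Int) : Decidable (Spec_integer_as_number_of_bits_power_of_two size out) := by unfold Spec_integer_as_number_of_bits_power_of_two; infer_instance

-- ===== CLAIM (what is proved, stated in full; the proofs are below) =====
def Claim_equal_integer_as_number_of_bits_power_of_two : Prop := ∀ (size : Int), Dom_integer_as_number_of_bits_power_of_two size → Spec_integer_as_number_of_bits_power_of_two size (integer_as_number_of_bits_power_of_two size)

-- ===== LEMMAS AND PROOFS =====

theorem pyBitLengthAux_mono (f : Nat) : ∀ n m : Nat, n ≤ m → pyBitLengthAux f n ≤ pyBitLengthAux f m := by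
  induction f with
  | zero => intro n m _; simp [pyBitLengthAux]
  | succ f ih =>
    intro n m h
    simp only [pyBitLengthAux]
    by_cases hn : n = 0
    · simp [hn]
    · have hm : m ≠ 0 := by omega
      simp only [if_neg hn, if_neg hm]
      exact Nat.succ_le_succ (ih _ _ (Nat.div_le_div_right h))

theorem pyBitLength_le_32 (n : Nat) (h : n ≤ 2147483648) : pyBitLength n ≤ 32 := by
  have := pyBitLengthAux_mono 64 n 2147483648 h
  have h32 : pyBitLengthAux 64 2147483648 = 32 := by decide
  simpa [pyBitLength, h32] using this

theorem pyBitLength_pos (n : Nat) (h : n ≠ 0) : 1 ≤ pyBitLength n := by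
  simp [pyBitLength, pyBitLengthAux, h]

-- both programs, for nonzero size, depend only on n = bit_length(size) ∈ [1, 32]
theorem key (n : Nat) (h1 : 1 ≤ n) (h2 : n ≤ 32) :
    pow2Loop n (n : Int) 1 = ((1 <<< pyBitLength (n - 1) : Nat) : Int) := by
  interval_cases n <;> decide

theorem integer_as_number_of_bits_power_of_two_eq (size : Int)
    (h : size.natAbs ≤ 2147483648) :
    integer_as_number_of_bits_power_of_two size = integer_as_number_of_bits_power_of_two_alt size := by
  by_cases h0 : size = 0
  · simp [integer_as_number_of_bits_power_of_two, integer_as_number_of_bits_power_of_two_alt, h0]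
  · have hna : size.natAbs ≠ 0 := by
      simpa [Int.natAbs_eq_zero] using h0
    have hbl : integer_as_number_of_bits size = (pyBitLength size.natAbs : Int) := by
      simp [integer_as_number_of_bits, h0]
    simp only [integer_as_number_of_bits_power_of_two,
      integer_as_number_of_bits_power_of_two_alt, if_neg h0, hbl]
    have h1 := pyBitLength_pos size.natAbs hna
    have h2 := pyBitLength_le_32 size.natAbs h
    simpa [Int.natAbs_natCast] using key (pyBitLength size.natAbs) h1 h2

-- ===== VERDICT (by name: the statement is the Claim_ definition above) =====
theorem integer_as_number_of_bits_power_of_two_spec : Claim_equal_integer_as_number_of_bits_power_of_two := by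
  intro size hdom
  unfold Spec_integer_as_number_of_bits_power_of_two
  have hb : size.natAbs ≤ 2147483648 := by
    have : (-2147483648 : Int) ≤ size ∧ size ≤ 2147483648 := by
      simpa [Dom_integer_as_number_of_bits_power_of_two, pvDomInt] using hdom
    omega
  exact integer_as_number_of_bits_power_of_two_eq size hb
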